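-- pv_equiv track=rewrite | github.com/sigongjoa/smart_grade | backend/engine/yedam_grader.py | _cluster_cards
-- ===== SOURCE A (Python) =====
-- from typing import Dict, List, Any, Optional
--
-- def _cluster_cards(bubbles: List[Any]) -> List[List[Any]]:
--     """Cluster all detected bubbles into 3 groups corresponding to cards."""
--     if not bubbles: return []
--
--     # Sort by Y
--     sorted_bubbles = sorted(bubbles, key=lambda b: b[1])
--
--     # Find gaps in Y
--     gaps = []
--     for i in range(1, len(sorted_bubbles)):
--         gap = sorted_bubbles[i][1] - (sorted_bubbles[i-1][1] + sorted_bubbles[i-1][3])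
--         if gap > 100: # Significant vertical gap between cards
--             gaps.append(i)
--
--     # We expect 2 gaps for 3 cards. If we find more/less, we try to split by count.
--     if len(gaps) == 2:
--         return [
--             sorted_bubbles[:gaps[0]],
--             sorted_bubbles[gaps[0]:gaps[1]],
--             sorted_bubbles[gaps[1]:]
--         ]
--
--     # Fallback: Split by count if gaps are not clear
--     n = len(sorted_bubbles)
--     return [
--         sorted_bubbles[:n//3],
--         sorted_bubbles[n//3:2*n//3],
--         sorted_bubbles[2*n//3:]
--     ]
-- ===== SOURCE B (Python) =====
-- from typing import List, Any
--
--
-- def _cluster_cards(bubbles: List[Any]) -> List[List[Any]]: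
--     """Cluster all detected bubbles into 3 groups corresponding to cards."""
--     if not bubbles:
--         return []
--
--     sb = sorted(bubbles, key=lambda b: b[1])
--
--     # Single pass: build clusters directly, closing a cluster at each large gap.
--     groups = [[sb[0]]]
--     for prev, cur in zip(sb, sb[1:]):
--         if cur[1] - (prev[1] + prev[3]) > 100:
--             groups.append([cur])
--         else:
--             groups[-1].append(cur)
--
--     if len(groups) == 3:
--         return groups
--
--     # Fallback: split by count if gaps are not clear
--     n = len(sb)
--     return [sb[:n // 3], sb[n // 3:2 * n // 3], sb[2 * n // 3:]]
-- ===== Notes on version B (the rewrite author's own statement) =====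
-- stated objective: alternative
-- what changed: Replaces A's two-phase shape (collect gap indices into a list, then slice the sorted list at gaps[0]/gaps[1]) with a single forward pass that builds the cluster lists directly, closing the current cluster whenever the vertical gap exceeds 100, keeping the same stable sort and the identical thirds fallback when the cluster count is not 3.
-- outside the precondition, e.g. on _cluster_cards([[5, 7], [1, 2]]): A raises IndexError, B raises IndexError
import Mathlib
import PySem

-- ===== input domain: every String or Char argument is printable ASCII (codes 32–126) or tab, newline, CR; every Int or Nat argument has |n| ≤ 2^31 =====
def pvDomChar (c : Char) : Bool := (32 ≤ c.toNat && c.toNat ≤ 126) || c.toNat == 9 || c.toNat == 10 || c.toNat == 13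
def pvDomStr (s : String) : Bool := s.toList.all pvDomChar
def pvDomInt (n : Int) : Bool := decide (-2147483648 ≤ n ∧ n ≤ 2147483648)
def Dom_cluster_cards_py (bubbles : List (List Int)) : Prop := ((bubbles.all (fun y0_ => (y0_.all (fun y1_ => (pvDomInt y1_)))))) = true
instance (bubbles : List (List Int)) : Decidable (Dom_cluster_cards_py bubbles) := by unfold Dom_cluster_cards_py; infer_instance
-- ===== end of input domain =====

-- B replaces A's two-phase shape (collect gap indices, then slice at gaps[0]/gaps[1]) with a single
-- forward pass that builds the cluster lists directly, closing a cluster at each gap > 100; same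
-- stable sort and identical thirds fallback (objective: alternative decomposition, same cost).

-- ===== PORT A =====
-- pyGetD is exact here because Pre_ keeps every accessed index in range (Python raises otherwise).
def cluster_cards_py (bubbles : List (List Int)) : List (List (List Int)) :=
  if bubbles = [] then []
  else
    let sb := PySem.List.sorted bubbles (fun b => PySem.List.pyGetD b 1 0) false
    let gaps := (PySem.List.pyRange 1 (sb.length : Int) 1).foldl
      (fun acc i =>
        if PySem.List.pyGetD (PySem.List.pyGetD sb i []) 1 0
            - (PySem.List.pyGetD (PySem.List.pyGetD sb (i-1) []) 1 0
               + PySem.List.pyGetD (PySem.List.pyGetD sb (i-1) []) 3 0) > 100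
        then acc ++ [i] else acc) []
    if gaps.length = 2 then
      [PySem.List.slice sb none (some (PySem.List.pyGetD gaps 0 0)),
       PySem.List.slice sb (some (PySem.List.pyGetD gaps 0 0)) (some (PySem.List.pyGetD gaps 1 0)),
       PySem.List.slice sb (some (PySem.List.pyGetD gaps 1 0)) none]
    else
      [PySem.List.slice sb none (some (PySem.Int.floordiv (sb.length : Int) 3)),
       PySem.List.slice sb (some (PySem.Int.floordiv (sb.length : Int) 3)) (some (PySem.Int.floordiv (2 * (sb.length : Int)) 3)),
       PySem.List.slice sb (some (PySem.Int.floordiv (2 * (sb.length : Int)) 3)) none]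

-- ===== PORT B =====
-- the gap test between a bubble and its predecessor (Source B's inline condition)
def pvGapB (prev cur : List Int) : Bool :=
  decide (PySem.List.pyGetD cur 1 0
    - (PySem.List.pyGetD prev 1 0 + PySem.List.pyGetD prev 3 0) > 100)

-- one step of Source B's loop: start a new cluster, or extend the last one (groups[-1].append)
def pvStepB (gs : List (List (List Int))) (pc : List Int × List Int) : List (List (List Int)) :=
  if pvGapB pc.1 pc.2 then gs ++ [[pc.2]]
  else gs.dropLast ++ [(PySem.List.pyGetD gs (-1) []) ++ [pc.2]]

def cluster_cards_py_alt (bubbles : List (List Int)) : List (List (List Int)) :=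
  if bubbles = [] then []
  else
    let sb := PySem.List.sorted bubbles (fun b => PySem.List.pyGetD b 1 0) false
    let groups := (sb.zip (PySem.List.slice sb (some 1) none)).foldl pvStepB
      [[PySem.List.pyGetD sb 0 []]]
    if groups.length = 3 then groups
    else
      [PySem.List.slice sb none (some (PySem.Int.floordiv (sb.length : Int) 3)),
       PySem.List.slice sb (some (PySem.Int.floordiv (sb.length : Int) 3)) (some (PySem.Int.floordiv (2 * (sb.length : Int)) 3)),
       PySem.List.slice sb (some (PySem.Int.floordiv (2 * (sb.length : Int)) 3)) none]

-- ===== PRECONDITION & SPEC =====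
-- Pre_ excludes lists containing a bubble with fewer than 4 entries: A reads b[1] and b[3] and raises
-- IndexError on essentially all such inputs; it conservatively also excludes the corner where only the
-- vertically-last bubble is short (there A still returns — see cites). A single-bubble list only has
-- its b[1] read, so length ≥ 2 suffices for it.
def Pre_cluster_cards_py (bubbles : List (List Int)) : Prop :=
  (∀ b ∈ bubbles, 4 ≤ b.length) ∨ (bubbles.length ≤ 1 ∧ ∀ b ∈ bubbles, 2 ≤ b.length)
instance (bubbles : List (List Int)) : Decidable (Pre_cluster_cards_py bubbles) := by
  unfold Pre_cluster_cards_py; infer_instance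

def pvWitness_cluster_cards_py : List (List Int) := [[0,0,5,5],[0,200,5,5],[0,400,5,5]]

def Spec_cluster_cards_py (bubbles : List (List Int)) (out : List (List (List Int))) : Prop := out = cluster_cards_py_alt bubbles
instance (bubbles : List (List Int)) (out : List (List (List Int))) : Decidable (Spec_cluster_cards_py bubbles out) := by unfold Spec_cluster_cards_py; infer_instance

-- ===== CLAIM (what is proved, stated in full; the proofs are below) =====
def Claim_equal_cluster_cards_py : Prop := ∀ (bubbles : List (List Int)), Dom_cluster_cards_py bubbles → Pre_cluster_cards_py bubbles → Spec_cluster_cards_py bubbles (cluster_cards_py bubbles)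

-- ===== LEMMAS AND PROOFS =====

-- proof-side view of B's loop: prepend-style run builder
def pvConsHead (x : List Int) : List (List (List Int)) → List (List (List Int))
  | [] => [[x]]
  | h :: t => (x :: h) :: t

def pvGlue (g : List (List Int)) : List (List (List Int)) → List (List (List Int))
  | [] => [g]
  | h :: t => (g ++ h) :: t

def pvRuns (prev : List Int) : List (List Int) → List (List (List Int))
  | [] => [[]]
  | c :: rest =>
    if pvGapB prev c then [] :: pvConsHead c (pvRuns c rest)
    else pvConsHead c (pvRuns c rest)

-- relative gap positions: p ∈ pvRelGaps prev rest ↔ a cluster break falls just before rest[p]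
def pvRelGaps (prev : List Int) : List (List Int) → List Nat
  | [] => []
  | c :: rest =>
    if pvGapB prev c then 0 :: (pvRelGaps c rest).map (· + 1)
    else (pvRelGaps c rest).map (· + 1)

-- A's gap test at index i of sb
def pvGapAt (sb : List (List Int)) (i : Int) : Bool :=
  decide (PySem.List.pyGetD (PySem.List.pyGetD sb i []) 1 0
    - (PySem.List.pyGetD (PySem.List.pyGetD sb (i-1) []) 1 0
       + PySem.List.pyGetD (PySem.List.pyGetD sb (i-1) []) 3 0) > 100)

lemma pvConsHead_eq_glue (c : List Int) (r : List (List (List Int))) :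
    pvConsHead c r = pvGlue [c] r := by cases r <;> simp [pvConsHead, pvGlue]

lemma pvGlue_consHead (g : List (List Int)) (c : List Int) (r : List (List (List Int))) :
    pvGlue g (pvConsHead c r) = pvGlue (g ++ [c]) r := by
  cases r <;> simp [pvConsHead, pvGlue]

lemma pvGlue_cons (g h : List (List Int)) (t : List (List (List Int))) :
    pvGlue g (h :: t) = (g ++ h) :: t := rfl

lemma pvFold_eq_glue_runs (rest : List (List Int)) :
    ∀ (prev : List Int) (g : List (List Int)) (gs0 : List (List (List Int))),
      ((prev :: rest).zip rest).foldl pvStepB (gs0 ++ [g]) = gs0 ++ pvGlue g (pvRuns prev rest) := by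
  induction rest with
  | nil => intro prev g gs0; simp [pvRuns, pvGlue]
  | cons c rest ih =>
    intro prev g gs0
    simp only [List.zip_cons_cons, List.foldl_cons, pvStepB, pvRuns]
    by_cases h : pvGapB prev c = true
    · simp only [h, if_true]
      rw [show (gs0 ++ [g]) ++ [[c]] = (gs0 ++ [g]) ++ [[c]] from rfl]
      rw [ih c [c] (gs0 ++ [g])]
      simp [pvGlue, pvConsHead_eq_glue, List.append_assoc]
    · simp only [Bool.not_eq_true] at h
      simp only [h, Bool.false_eq_true, if_false, List.dropLast_concat,
        PySem.List.pyGetD_neg_one_append_singleton]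
      rw [ih c (g ++ [c]) gs0, pvGlue_consHead]

lemma pvGlue_runs_length (rest : List (List Int)) :
    ∀ (prev : List Int) (g : List (List Int)),
      (pvGlue g (pvRuns prev rest)).length = (pvRelGaps prev rest).length + 1 := by
  induction rest with
  | nil => intro prev g; simp [pvRuns, pvRelGaps, pvGlue]
  | cons c rest ih =>
    intro prev g
    by_cases h : pvGapB prev c = true
    · simp [pvRuns, pvRelGaps, h, pvGlue_cons, pvConsHead_eq_glue, ih c [c]]
    · simp only [Bool.not_eq_true] at h
      simp [pvRuns, pvRelGaps, h, pvGlue_consHead, ih c (g ++ [c])]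

lemma pvRelGaps_nil_seg (rest : List (List Int)) :
    ∀ (prev : List Int) (g : List (List Int)), pvRelGaps prev rest = [] →
      pvGlue g (pvRuns prev rest) = [g ++ rest] := by
  induction rest with
  | nil => intro prev g _; simp [pvRuns, pvGlue]
  | cons c rest ih =>
    intro prev g hrg
    by_cases h : pvGapB prev c = true
    · simp [pvRelGaps, h] at hrg
    · simp only [Bool.not_eq_true] at h
      simp only [pvRelGaps, h, Bool.false_eq_true, if_false, List.map_eq_nil_iff] at hrg
      simp only [pvRuns, h, Bool.false_eq_true, if_false, pvGlue_consHead]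
      rw [ih c (g ++ [c]) hrg]
      simp

lemma pvRelGaps_one_seg (rest : List (List Int)) :
    ∀ (prev : List Int) (g : List (List Int)) (p : Nat), pvRelGaps prev rest = [p] →
      pvGlue g (pvRuns prev rest) = [g ++ rest.take p, rest.drop p] := by
  induction rest with
  | nil => intro prev g p hrg; simp [pvRelGaps] at hrg
  | cons c rest ih =>
    intro prev g p hrg
    by_cases h : pvGapB prev c = true
    · simp only [pvRelGaps, h, if_true, List.cons.injEq] at hrg
      obtain ⟨hp, hmap⟩ := hrg
      rw [List.map_eq_nil_iff] at hmap
      simp only [pvRuns, h, if_true, pvGlue_cons, pvConsHead_eq_glue]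
      rw [pvRelGaps_nil_seg rest c [c] hmap]
      simp [← hp]
    · simp only [Bool.not_eq_true] at h
      simp only [pvRelGaps, h, Bool.false_eq_true, if_false] at hrg
      obtain ⟨q, hq, rfl⟩ : ∃ q, pvRelGaps c rest = [q] ∧ p = q + 1 := by
        cases hrg' : pvRelGaps c rest with
        | nil => rw [hrg'] at hrg; simp at hrg
        | cons a t =>
          rw [hrg'] at hrg
          cases t with
          | nil => simp at hrg; exact ⟨a, rfl, hrg.symm⟩
          | cons b t' => simp at hrg
      simp only [pvRuns, h, Bool.false_eq_true, if_false, pvGlue_consHead]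
      rw [ih c (g ++ [c]) q hq]
      simp

lemma pvRelGaps_two_seg (rest : List (List Int)) :
    ∀ (prev : List Int) (g : List (List Int)) (p0 p1 : Nat), pvRelGaps prev rest = [p0, p1] →
      pvGlue g (pvRuns prev rest) =
        [g ++ rest.take p0, (rest.drop p0).take (p1 - p0), rest.drop p1] := by
  induction rest with
  | nil => intro prev g p0 p1 hrg; simp [pvRelGaps] at hrg
  | cons c rest ih =>
    intro prev g p0 p1 hrg
    by_cases h : pvGapB prev c = true
    · simp only [pvRelGaps, h, if_true, List.cons.injEq] at hrg
      obtain ⟨hp0, hmap⟩ := hrg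
      obtain ⟨q, hq, hp1⟩ : ∃ q, pvRelGaps c rest = [q] ∧ p1 = q + 1 := by
        cases hrg' : pvRelGaps c rest with
        | nil => rw [hrg'] at hmap; simp at hmap
        | cons a t =>
          rw [hrg'] at hmap
          cases t with
          | nil => simp at hmap; exact ⟨a, rfl, hmap.symm⟩
          | cons b t' => simp at hmap
      simp only [pvRuns, h, if_true, pvGlue_cons, pvConsHead_eq_glue]
      rw [pvRelGaps_one_seg rest c [c] q hq]
      subst hp1
      simp [← hp0]
    · simp only [Bool.not_eq_true] at h
      simp only [pvRelGaps, h, Bool.false_eq_true, if_false] at hrg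
      obtain ⟨q0, q1, hq, hp0, hp1⟩ :
          ∃ q0 q1, pvRelGaps c rest = [q0, q1] ∧ p0 = q0 + 1 ∧ p1 = q1 + 1 := by
        cases hrg' : pvRelGaps c rest with
        | nil => rw [hrg'] at hrg; simp at hrg
        | cons a t =>
          rw [hrg'] at hrg
          cases t with
          | nil => simp at hrg
          | cons b t' =>
            cases t' with
            | nil =>
              simp at hrg
              exact ⟨a, b, rfl, hrg.1.symm, hrg.2.symm⟩
            | cons e t'' => simp at hrg
      simp only [pvRuns, h, Bool.false_eq_true, if_false, pvGlue_consHead]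
      rw [ih c (g ++ [c]) q0 q1 hq]
      subst hp0; subst hp1
      simp [Nat.succ_sub_succ]

lemma pvGapsFilter (xs : List (List Int)) :
    ∀ (prev : List Int) (pre : List (List Int)),
      (PySem.List.pyRange ((pre.length : Int) + 1) ((pre.length : Int) + 1 + (xs.length : Int)) 1).filter
          (pvGapAt (pre ++ prev :: xs))
        = (pvRelGaps prev xs).map (fun (p : Nat) => (pre.length : Int) + 1 + (p : Int)) := by
  induction xs with
  | nil =>
    intro prev pre
    rw [PySem.List.pyRange_one_eq_nil (by simp)]
    simp [pvRelGaps]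
  | cons c xs ih =>
    intro prev pre
    have hb : ((pre.length : Int) + 1) < (pre.length : Int) + 1 + ((c :: xs).length : Int) := by
      simp only [List.length_cons]; push_cast; omega
    rw [PySem.List.pyRange_one_cons hb, List.filter_cons]
    have hc1 : ((pre.length : Int) + 1) = (((pre.length + 1 : Nat)) : Int) := by push_cast; ring
    have hcur : PySem.List.pyGetD (pre ++ prev :: c :: xs) ((pre.length : Int) + 1) [] = c := by
      rw [hc1, PySem.List.pyGetD_natCast, List.getD_eq_getElem?_getD,
        List.getElem?_append_right (by omega)]
      simp
    have hprev : PySem.List.pyGetD (pre ++ prev :: c :: xs) ((pre.length : Int) + 1 - 1) [] = prev := by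
      have h0 : ((pre.length : Int) + 1 - 1) = ((pre.length : Nat) : Int) := by ring
      rw [h0, PySem.List.pyGetD_natCast, List.getD_eq_getElem?_getD,
        List.getElem?_append_right (by omega)]
      simp
    have hgap : pvGapAt (pre ++ prev :: c :: xs) ((pre.length : Int) + 1) = pvGapB prev c := by
      simp only [pvGapAt, pvGapB, hcur, hprev]
    have hrec :
        (PySem.List.pyRange ((pre.length : Int) + 1 + 1) ((pre.length : Int) + 1 + ((c :: xs).length : Int)) 1).filter
            (pvGapAt (pre ++ prev :: c :: xs))
          = (pvRelGaps c xs).map (fun (p : Nat) => (pre.length : Int) + 1 + 1 + (p : Int)) := by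
      have h1 : ((pre.length : Int) + 1 + 1) = (((pre ++ [prev]).length : Nat) : Int) + 1 := by
        simp only [List.length_append, List.length_cons, List.length_nil]; push_cast; omega
      have h2 : ((pre.length : Int) + 1 + ((c :: xs).length : Int))
          = (((pre ++ [prev]).length : Nat) : Int) + 1 + ((xs.length : Int)) := by
        simp only [List.length_append, List.length_cons, List.length_nil]; push_cast; omega
      have h3 : pre ++ prev :: c :: xs = (pre ++ [prev]) ++ c :: xs := by simp
      rw [h1, h2, h3, ih c (pre ++ [prev])]
    rw [hgap, hrec]
    by_cases h : pvGapB prev c = true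
    · simp only [h, if_true, pvRelGaps, List.map_cons, List.map_map, List.cons.injEq,
        Nat.cast_zero]
      refine ⟨by ring, ?_⟩
      apply List.map_congr_left; intro p _
      simp only [Function.comp_apply]; push_cast; ring
    · simp only [Bool.not_eq_true] at h
      simp only [h, Bool.false_eq_true, if_false, pvRelGaps, List.map_map]
      apply List.map_congr_left; intro p _
      simp only [Function.comp_apply]; push_cast; ring

-- A's gap-index list over the whole sorted list, in terms of pvRelGaps
lemma pvGapsTop (x : List Int) (xs : List (List Int)) :
    (PySem.List.pyRange 1 (((x :: xs).length : Int)) 1).filter (pvGapAt (x :: xs))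
      = (pvRelGaps x xs).map (fun (p : Nat) => 1 + (p : Int)) := by
  have h := pvGapsFilter xs x []
  simp only [List.length_nil, Nat.cast_zero, zero_add, List.nil_append] at h
  have hlen : (((x :: xs).length : Int)) = 1 + (xs.length : Int) := by
    simp only [List.length_cons]; push_cast; ring
  rw [hlen, h]

-- ===== VERDICT (by name: the statement is the Claim_ definition above) =====
theorem cluster_cards_py_spec : Claim_equal_cluster_cards_py := by
  intro bubbles _ _
  unfold Spec_cluster_cards_py
  by_cases hb : bubbles = []
  · simp [cluster_cards_py, cluster_cards_py_alt, hb]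
  · have hs : PySem.List.sorted bubbles (fun b => PySem.List.pyGetD b 1 0) false ≠ [] := by
      rw [Ne, PySem.List.sorted_eq_nil_iff]; exact hb
    obtain ⟨x, xs, hsb⟩ := List.exists_cons_of_ne_nil hs
    simp only [cluster_cards_py, cluster_cards_py_alt, if_neg hb]
    rw [hsb]
    rw [PySem.List.foldl_append_ite_eq_filter]
    have hfil : List.filter
        (fun i => decide
          (PySem.List.pyGetD (PySem.List.pyGetD (x :: xs) i []) 1 0 -
            (PySem.List.pyGetD (PySem.List.pyGetD (x :: xs) (i - 1) []) 1 0 +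
              PySem.List.pyGetD (PySem.List.pyGetD (x :: xs) (i - 1) []) 3 0) > 100))
        (PySem.List.pyRange 1 (((x :: xs).length : Int)) 1)
        = (pvRelGaps x xs).map (fun (p : Nat) => 1 + (p : Int)) := pvGapsTop x xs
    rw [List.nil_append, hfil, PySem.List.slice_from_one, List.tail_cons,
      PySem.List.pyGetD_zero_cons]
    have hgroups : List.foldl pvStepB [[x]] ((x :: xs).zip xs) = pvGlue [x] (pvRuns x xs) := by
      simpa using pvFold_eq_glue_runs xs x [x] []
    rw [hgroups]
    have hlen3 : (pvGlue [x] (pvRuns x xs)).length = (pvRelGaps x xs).length + 1 :=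
      pvGlue_runs_length xs x [x]
    rcases hrg : pvRelGaps x xs with _ | ⟨p0, _ | ⟨p1, _ | ⟨p2, t⟩⟩⟩
    · rw [hrg] at hlen3
      rw [if_neg (by simp), if_neg (by rw [hlen3]; simp)]
    · rw [hrg] at hlen3
      rw [if_neg (by simp), if_neg (by rw [hlen3]; simp)]
    · -- exactly two gaps: A slices at the two indices, B's pass yields the same three clusters
      have hseg := pvRelGaps_two_seg xs x [x] p0 p1 hrg
      rw [hseg]
      rw [if_pos (by simp), if_pos (by simp)]
      have e0 : PySem.List.pyGetD (List.map (fun (p : Nat) => 1 + (p : Int)) [p0, p1]) 0 0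
          = (((p0 + 1 : Nat)) : Int) := by
        simp only [List.map_cons, List.map_nil, PySem.List.pyGetD_zero_cons]; push_cast; ring
      have e1 : PySem.List.pyGetD (List.map (fun (p : Nat) => 1 + (p : Int)) [p0, p1]) 1 0
          = (((p1 + 1 : Nat)) : Int) := by
        simp only [List.map_cons, List.map_nil]
        rw [show ((1 : Int)) = ((1 : Nat) : Int) by norm_num, PySem.List.pyGetD_natCast]
        simp only [List.getD_cons_succ, List.getD_cons_zero]; push_cast; ring
      rw [e0, e1, PySem.List.slice_to_natCast, PySem.List.slice_natCast,
        PySem.List.slice_from_natCast]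
      simp [List.take_succ_cons, List.drop_succ_cons, Nat.succ_sub_succ]
    · rw [hrg] at hlen3
      rw [if_neg (by simp), if_neg (by rw [hlen3]; simp)]
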